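-- pv_equiv track=rewrite | github.com/chernwuqq/LiM | generate_c_v2.py | extract_trees_from_dump
-- ===== SOURCE A (Python) =====
-- def extract_trees_from_dump(dump_text, n_trees):
--     """Extract tree structures from dump text"""
--     trees = []
--     tree_blocks = dump_text.split('booster[')
--
--     for block in tree_blocks[1:]:
--         if len(trees) >= n_trees:
--             break
--         tree_text = 'booster[' + block.split('booster[')[0]
--         trees.append(tree_text)
--
--     return trees
-- ===== SOURCE B (Python) =====
-- def extract_trees_from_dump(dump_text, n_trees):
--     """Extract tree structures from dump text"""
--     marker = 'booster['
--     trees = []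
--     idx = dump_text.find(marker)
--     while idx != -1 and len(trees) < n_trees:
--         nxt = dump_text.find(marker, idx + len(marker))
--         trees.append(dump_text[idx:] if nxt == -1 else dump_text[idx:nxt])
--         idx = nxt
--     return trees
-- ===== Notes on version B (the rewrite author's own statement) =====
-- stated objective: alternative
-- what changed: Replaces split('booster[') materialising the whole block list (plus a redundant inner split per block) with a single running-cursor scan using str.find that slices each tree block directly and stops as soon as n_trees blocks are collected.
import Mathlib
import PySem

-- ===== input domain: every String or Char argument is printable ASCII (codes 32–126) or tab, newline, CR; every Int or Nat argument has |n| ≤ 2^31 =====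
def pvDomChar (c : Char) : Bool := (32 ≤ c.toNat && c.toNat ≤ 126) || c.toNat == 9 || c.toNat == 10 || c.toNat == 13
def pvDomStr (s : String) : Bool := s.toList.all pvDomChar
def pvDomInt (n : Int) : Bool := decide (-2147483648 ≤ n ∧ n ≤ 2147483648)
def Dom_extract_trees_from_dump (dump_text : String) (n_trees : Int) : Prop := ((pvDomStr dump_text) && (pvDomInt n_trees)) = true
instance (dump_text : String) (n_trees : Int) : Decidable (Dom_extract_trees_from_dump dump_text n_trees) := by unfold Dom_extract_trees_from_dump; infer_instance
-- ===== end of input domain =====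

-- B replaces A's split('booster[') (which materialises the whole block list and re-splits each
-- block) with a single running-cursor scan using str.find that slices each tree block directly
-- and stops as soon as n_trees blocks are collected (objective: alternative).

-- ===== PORT A =====
-- the for-loop over tree_blocks[1:] with its early break
def pvGoA (n_trees : Int) (blocks : List (List Char)) (trees : List String) : List String :=
  match blocks with
  | [] => trees
  | b :: rest =>
    if n_trees ≤ (trees.length : Int) then trees
    else pvGoA n_trees rest
      -- block.split('booster[')[0]: split of a non-empty separator never returns [],
      -- so the Python indexing [0] always succeeds; headD [] is exact here
      (trees ++ [String.ofList ("booster[".toList ++ (PySem.Chars.splitOn b "booster[".toList).headD [])])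

def extract_trees_from_dump (dump_text : String) (n_trees : Int) : List String :=
  pvGoA n_trees (PySem.Chars.splitOn dump_text.toList "booster[".toList).tail []

-- ===== PORT B =====
-- the while-loop of Source B; fuel bounds the iteration count (each step advances the cursor by
-- at least the marker length 8, so dump_text.length + 1 iterations always suffice)
def pvGoB (dump_text : String) (n_trees : Int) (fuel : Nat) (idx : Int) (trees : List String) : List String :=
  match fuel with
  | 0 => trees
  | fuel + 1 =>
    if idx ≠ -1 ∧ (trees.length : Int) < n_trees then
      let nxt := PySem.Str.findFrom dump_text "booster[" (idx + 8)  -- idx + len(marker)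
      let t := if nxt = -1 then PySem.Str.slice dump_text (some idx) none
               else PySem.Str.slice dump_text (some idx) (some nxt)
      pvGoB dump_text n_trees fuel nxt (trees ++ [t])
    else trees

def extract_trees_from_dump_alt (dump_text : String) (n_trees : Int) : List String :=
  pvGoB dump_text n_trees (dump_text.toList.length + 1) (PySem.Str.find dump_text "booster[") []

-- ===== PRECONDITION & SPEC =====
def Spec_extract_trees_from_dump (dump_text : String) (n_trees : Int) (out : List String) : Prop := out = extract_trees_from_dump_alt dump_text n_trees
instance (dump_text : String) (n_trees : Int) (out : List String) : Decidable (Spec_extract_trees_from_dump dump_text n_trees out) := by unfold Spec_extract_trees_from_dump; infer_instance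

-- ===== CLAIM (what is proved, stated in full; the proofs are below) =====
def Claim_equal_extract_trees_from_dump : Prop := ∀ (dump_text : String) (n_trees : Int), Dom_extract_trees_from_dump dump_text n_trees → Spec_extract_trees_from_dump dump_text n_trees (extract_trees_from_dump dump_text n_trees)

-- ===== LEMMAS AND PROOFS =====

-- find points at position j iff sep is a prefix of the drop at j and at no earlier position
theorem find_eq_of_first (l sub : List Char) (j : Nat)
    (hj : sub <+: l.drop j)
    (hmin : ∀ m < j, ¬ sub <+: l.drop m) :
    PySem.Chars.find l sub = (j : Int) := by
  have hinf : sub <:+: l :=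
    (PySem.Chars.isIn_iff_infix _ _).mp
      ((PySem.Chars.exists_prefix_drop_iff_isIn (s := l) (sub := sub)).mp ⟨j, hj⟩)
  have h0 : 0 ≤ PySem.Chars.find l sub := (PySem.Chars.find_nonneg_iff _ _).mpr hinf
  obtain ⟨hpre, hm⟩ := PySem.Chars.find_spec h0
  have : (PySem.Chars.find l sub).toNat = j := by
    rcases lt_trichotomy ((PySem.Chars.find l sub).toNat) j with h | h | h
    · exact absurd hpre (hmin _ h)
    · exact h
    · exact absurd hj (hm j h)
  omega

theorem find_eq_zero_of_prefix (l sub : List Char) (h : sub <+: l) :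
    PySem.Chars.find l sub = 0 := by
  have := find_eq_of_first l sub 0 (by simpa using h) (by omega)
  simpa using this

theorem find_cons_of_not_prefix (l sub : List Char) (c : Char) (h : ¬ sub <+: (c :: l)) :
    PySem.Chars.find (c :: l) sub =
      if PySem.Chars.find l sub = -1 then -1 else PySem.Chars.find l sub + 1 := by
  by_cases hl : PySem.Chars.find l sub = -1
  · rw [if_pos hl]
    rw [PySem.Chars.find_eq_neg_one_iff] at hl ⊢
    intro hinf
    rcases (PySem.Chars.exists_prefix_drop_iff_isIn (s := c :: l) (sub := sub)).mpr
      ((PySem.Chars.isIn_iff_infix _ _).mpr hinf) with ⟨j, hj⟩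
    match j, hj with
    | 0, hj => exact h (by simpa using hj)
    | j + 1, hj =>
      exact hl ((PySem.Chars.isIn_iff_infix _ _).mp
        ((PySem.Chars.exists_prefix_drop_iff_isIn (s := l) (sub := sub)).mp ⟨j, by simpa using hj⟩))
  · rw [if_neg hl]
    have h0 : 0 ≤ PySem.Chars.find l sub := by
      have := PySem.Chars.neg_one_le_find (s := l) (sub := sub); omega
    obtain ⟨hpre, hm⟩ := PySem.Chars.find_spec h0
    have := find_eq_of_first (c :: l) sub ((PySem.Chars.find l sub).toNat + 1)
      (by simpa using hpre)
      (by
        intro m hmlt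
        match m with
        | 0 => simpa using h
        | m + 1 => simpa using hm m (by omega))
    push_cast at this
    omega

def pvSep : List Char := "booster[".toList

theorem pvSep_length : pvSep.length = 8 := by decide

theorem occ_bound (l : List Char) (h : ¬ PySem.Chars.find l pvSep = -1) :
    (PySem.Chars.find l pvSep).toNat + 8 ≤ l.length := by
  have h0 : 0 ≤ PySem.Chars.find l pvSep := by
    have := PySem.Chars.neg_one_le_find (s := l) (sub := pvSep); omega
  obtain ⟨hpre, -⟩ := PySem.Chars.find_spec h0
  have := hpre.length_le
  simp [pvSep_length] at this
  omega

-- the pure recursive description of l.split('booster['): cut at the first occurrence, recurse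
def pvSplitSpec (l : List Char) : List (List Char) :=
  if h : PySem.Chars.find l pvSep = -1 then [l]
  else l.take (PySem.Chars.find l pvSep).toNat ::
    pvSplitSpec (l.drop ((PySem.Chars.find l pvSep).toNat + 8))
termination_by l.length
decreasing_by
  have := occ_bound l h
  simp only [List.length_drop]
  omega

theorem pvSplitSpec_ne_nil (l : List Char) : pvSplitSpec l ≠ [] := by
  rw [pvSplitSpec]; split <;> simp

def pvConsHead (p : List Char) : List (List Char) → List (List Char)
  | [] => [p]
  | x :: xs => (p ++ x) :: xs

theorem pvConsHead_nil (L : List (List Char)) (h : L ≠ []) : pvConsHead [] L = L := by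
  cases L with
  | nil => exact absurd rfl h
  | cons x xs => simp [pvConsHead]

theorem pvConsHead_consHead (p q : List Char) (L : List (List Char)) :
    pvConsHead p (pvConsHead q L) = pvConsHead (p ++ q) L := by
  cases L <;> simp [pvConsHead]

theorem splitSpec_cons (c : Char) (rest : List Char) (hp : ¬ pvSep <+: c :: rest) :
    pvSplitSpec (c :: rest) = pvConsHead [c] (pvSplitSpec rest) := by
  have hfc := find_cons_of_not_prefix rest pvSep c hp
  by_cases hl : PySem.Chars.find rest pvSep = -1
  · have hfc' : PySem.Chars.find (c :: rest) pvSep = -1 := by simp [hfc, hl]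
    rw [pvSplitSpec, dif_pos hfc']
    conv_rhs => rw [pvSplitSpec, dif_pos hl]
    simp [pvConsHead]
  · have h0 : 0 ≤ PySem.Chars.find rest pvSep := by
      have := PySem.Chars.neg_one_le_find (s := rest) (sub := pvSep); omega
    rw [if_neg hl] at hfc
    have hne : ¬ PySem.Chars.find (c :: rest) pvSep = -1 := by omega
    conv_lhs => rw [pvSplitSpec]
    rw [dif_neg hne]
    conv_rhs => rw [pvSplitSpec, dif_neg hl]
    have ht : (PySem.Chars.find (c :: rest) pvSep).toNat
        = (PySem.Chars.find rest pvSep).toNat + 1 := by omega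
    rw [ht]
    simp [pvConsHead, List.drop_succ_cons, List.take_succ_cons]

-- invariant of the character-scanning loop inside PySem.Chars.splitOn
theorem go_spec (fuel : Nat) : ∀ (l cur : List Char) (acc : List (List Char)), l.length ≤ fuel →
    PySem.Chars.splitOn.go pvSep fuel l cur acc
      = acc.reverse ++ pvConsHead cur.reverse (pvSplitSpec l) := by
  induction fuel with
  | zero =>
    intro l cur acc hl
    have : l = [] := by simpa using hl
    subst this
    rw [PySem.Chars.splitOn.go]
    have : pvSplitSpec [] = [[]] := by rw [pvSplitSpec]; simp [dif_pos (by decide : PySem.Chars.find [] pvSep = -1)]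
    simp [this, pvConsHead]
  | succ fuel ih =>
    intro l cur acc hl
    cases l with
    | nil =>
      rw [PySem.Chars.splitOn.go]
      have : pvSplitSpec [] = [[]] := by rw [pvSplitSpec]; simp [dif_pos (by decide : PySem.Chars.find [] pvSep = -1)]
      simp [this, pvConsHead]
      omega
    | cons c rest =>
      by_cases hp : pvSep.isPrefixOf (c :: rest) = true
      · rw [PySem.Chars.splitOn.go, if_pos hp]
        rw [ih _ [] _ (by simp [pvSep_length] at hl ⊢; omega)]
        have hf0 : PySem.Chars.find (c :: rest) pvSep = 0 :=
          find_eq_zero_of_prefix _ _ (List.isPrefixOf_iff_prefix.mp hp)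
        have : pvSplitSpec (c :: rest)
            = [] :: pvSplitSpec ((c :: rest).drop 8) := by
          rw [pvSplitSpec, dif_neg (by omega : ¬ PySem.Chars.find (c :: rest) pvSep = -1)]
          simp [hf0]
        rw [this]
        simp only [pvSep_length, List.reverse_nil, List.reverse_cons, List.append_assoc]
        rw [pvConsHead_nil _ (pvSplitSpec_ne_nil _)]
        simp [pvConsHead]
      · rw [PySem.Chars.splitOn.go, if_neg hp]
        rw [ih _ (c :: cur) _ (by simpa using Nat.le_of_succ_le_succ hl)]
        rw [splitSpec_cons c rest (fun hpre => hp (List.isPrefixOf_iff_prefix.mpr hpre))]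
        simp [pvConsHead_consHead]

theorem splitOn_eq_spec (l : List Char) :
    PySem.Chars.splitOn l pvSep = pvSplitSpec l := by
  show PySem.Chars.splitOn.go pvSep (l.length + 1) l [] [] = _
  rw [go_spec (l.length + 1) l [] [] (by omega)]
  simp [pvConsHead_nil _ (pvSplitSpec_ne_nil _)]

-- the piece before the first occurrence contains no occurrence
theorem find_take_first (l : List Char)
    (h0 : 0 ≤ PySem.Chars.find l pvSep) :
    PySem.Chars.find (l.take (PySem.Chars.find l pvSep).toNat) pvSep = -1 := by
  obtain ⟨-, hmin⟩ := PySem.Chars.find_spec h0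
  set i := (PySem.Chars.find l pvSep).toNat with hi
  rw [PySem.Chars.find_eq_neg_one_iff]
  intro hinf
  obtain ⟨j, hj⟩ := (PySem.Chars.exists_prefix_drop_iff_isIn (s := l.take i) (sub := pvSep)).mpr
    ((PySem.Chars.isIn_iff_infix _ _).mpr hinf)
  have hlen := hj.length_le
  simp [pvSep_length] at hlen
  rw [List.drop_take] at hj
  have hj' : pvSep <+: l.drop j := hj.trans (List.take_prefix _ _)
  exact hmin j (by omega) hj'

-- no piece produced by the split contains the separator
theorem noSep (l : List Char) : ∀ p ∈ pvSplitSpec l, PySem.Chars.find p pvSep = -1 := by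
  induction l using pvSplitSpec.induct with
  | case1 l h =>
    rw [pvSplitSpec, dif_pos h]
    intro p hp
    simp at hp
    subst hp
    exact h
  | case2 l h ih =>
    rw [pvSplitSpec, dif_neg h]
    intro p hp
    rcases List.mem_cons.mp hp with hp | hp
    · subst hp
      exact find_take_first l (by have := PySem.Chars.neg_one_le_find (s := l) (sub := pvSep); omega)
    · exact ih p hp

-- A's loop over separator-free blocks is a capped map
theorem goA_spec (n : Int) (blocks : List (List Char))
    (hb : ∀ b ∈ blocks, PySem.Chars.find b pvSep = -1) :
    ∀ trees : List String, pvGoA n blocks trees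
      = trees ++ (blocks.take (n - trees.length).toNat).map
          (fun b => String.ofList (pvSep ++ b)) := by
  induction blocks with
  | nil => intro trees; simp [pvGoA]
  | cons b rest ih =>
    intro trees
    rw [pvGoA]
    by_cases hle : n ≤ (trees.length : Int)
    · rw [if_pos hle]
      have : (n - (trees.length : Int)).toNat = 0 := by omega
      simp [this]
    · rw [if_neg hle]
      have hsplit : PySem.Chars.splitOn b "booster[".toList = [b] := by
        rw [show "booster[".toList = pvSep from rfl, splitOn_eq_spec, pvSplitSpec,
          dif_pos (hb b (List.mem_cons_self))]
      rw [ih (fun b hb' => hb b (List.mem_cons_of_mem _ hb'))]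
      have h1 : (n - (trees.length : Int)).toNat = (n - ((trees.length : Int) + 1)).toNat + 1 := by
        omega
      rw [hsplit]
      simp only [List.headD_cons, h1, List.take_succ_cons, List.map_cons]
      simp [show "booster[".toList = pvSep from rfl]

theorem drop_eq_sep_append (cs : List Char) (j : Nat) (hocc : pvSep <+: cs.drop j) :
    cs.drop j = pvSep ++ cs.drop (j + 8) := by
  obtain ⟨t, ht⟩ := hocc
  have hdd : cs.drop (j + 8) = (cs.drop j).drop 8 := by
    rw [List.drop_drop, Nat.add_comm]
  rw [hdd, ← ht]
  simp [pvSep_length]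

-- B's loop, started at an occurrence position j, is the same capped map over the split of the suffix
theorem goB_spec (s : String) (n : Int) (fuel : Nat) :
    ∀ (j : Nat) (trees : List String),
    pvSep <+: s.toList.drop j →
    s.toList.length - j < fuel →
    pvGoB s n fuel (j : Int) trees
      = trees ++ ((pvSplitSpec (s.toList.drop (j + 8))).take (n - trees.length).toNat).map
          (fun p => String.ofList (pvSep ++ p)) := by
  induction fuel with
  | zero => intro j trees _ hf; omega
  | succ fuel ih =>
    intro j trees hocc hf
    have hjlen : j + 8 ≤ s.toList.length := by
      have := hocc.length_le
      rw [List.length_drop, pvSep_length] at this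
      omega
    rw [pvGoB]
    by_cases hle : n ≤ (trees.length : Int)
    · rw [if_neg (by omega)]
      have : (n - (trees.length : Int)).toNat = 0 := by omega
      simp [this]
    · rw [if_pos ⟨by omega, by omega⟩]
      have hcast : (j : Int) + 8 = ((j + 8 : Nat) : Int) := by push_cast; ring
      have hfind : PySem.Str.findFrom s "booster[" ((j : Int) + 8)
          = if PySem.Chars.find (s.toList.drop (j + 8)) pvSep = -1 then -1
            else ((j + 8 : Nat) : Int) + PySem.Chars.find (s.toList.drop (j + 8)) pvSep := by
        rw [hcast, PySem.Str.findFrom_eq]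
        exact PySem.Chars.findFrom_natCast s.toList pvSep (j + 8) hjlen
      set u := s.toList.drop (j + 8) with hu
      by_cases hfu : PySem.Chars.find u pvSep = -1
      · rw [hfind, if_pos hfu]
        simp only []
        simp only [reduceIte]
        have htl : PySem.Str.slice s (some (j : Int)) none = String.ofList (pvSep ++ u) := by
          apply String.toList_inj.mp
          simp [PySem.List.slice_from_natCast]
          rw [← drop_eq_sep_append s.toList j hocc]
        rw [htl]
        have hstop : pvGoB s n fuel (-1) (trees ++ [String.ofList (pvSep ++ u)])
            = trees ++ [String.ofList (pvSep ++ u)] := by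
          cases fuel with
          | zero => rw [pvGoB]
          | succ f => rw [pvGoB, if_neg (by simp)]
        rw [hstop]
        conv_rhs => rw [pvSplitSpec, dif_pos hfu]
        have : (n - (trees.length : Int)).toNat = ((n - (trees.length : Int)).toNat - 1) + 1 := by
          omega
        rw [this]
        simp
      · rw [hfind, if_neg hfu]
        have h0 : 0 ≤ PySem.Chars.find u pvSep := by
          have := PySem.Chars.neg_one_le_find (s := u) (sub := pvSep); omega
        set i := (PySem.Chars.find u pvSep).toNat with hi
        have hnxt : ((j + 8 : Nat) : Int) + PySem.Chars.find u pvSep = ((j + 8 + i : Nat) : Int) := by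
          push_cast; omega
        rw [hnxt]
        simp only []
        rw [if_neg (by push_cast; omega)]
        obtain ⟨hpre, -⟩ := PySem.Chars.find_spec h0
        rw [← hi] at hpre
        have hocc' : pvSep <+: s.toList.drop (j + 8 + i) := by
          have h' := hpre
          rw [hu, List.drop_drop] at h'
          exact h'
        have htl : PySem.Str.slice s (some (j : Int)) (some ((j + 8 + i : Nat) : Int))
            = String.ofList (pvSep ++ u.take i) := by
          apply String.toList_inj.mp
          simp only [PySem.Str.toList_slice, PySem.Chars.slice_eq_listSlice,
            PySem.List.slice_natCast]
          rw [drop_eq_sep_append s.toList j hocc]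
          rw [show j + 8 + i - j = pvSep.length + i by simp [pvSep_length]; omega]
          rw [List.take_length_add_append]
          simp [← hu]
        rw [htl]
        rw [ih (j + 8 + i) (trees ++ [String.ofList (pvSep ++ u.take i)]) hocc' (by omega)]
        conv_rhs => rw [pvSplitSpec, dif_neg hfu]
        have hcount : (n - (trees.length : Int)).toNat
            = (n - ((trees ++ [String.ofList (pvSep ++ u.take i)]).length : Int)).toNat + 1 := by
          simp; omega
        rw [hcount]
        simp only [List.take_succ_cons, List.map_cons, ← hi]
        rw [show u.drop (i + 8) = s.toList.drop (j + 8 + i + 8) by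
          rw [hu, List.drop_drop]; ring_nf]
        simp

theorem main_equiv (s : String) (n : Int) :
    extract_trees_from_dump s n = extract_trees_from_dump_alt s n := by
  rw [extract_trees_from_dump, extract_trees_from_dump_alt]
  rw [show "booster[".toList = pvSep from rfl, splitOn_eq_spec]
  rw [PySem.Str.find_eq, show "booster[".toList = pvSep from rfl]
  by_cases hf : PySem.Chars.find s.toList pvSep = -1
  · rw [pvSplitSpec, dif_pos hf, hf]
    rw [pvGoB, if_neg (by simp)]
    simp [pvGoA]
  · have h0 : 0 ≤ PySem.Chars.find s.toList pvSep := by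
      have := PySem.Chars.neg_one_le_find (s := s.toList) (sub := pvSep); omega
    set i := (PySem.Chars.find s.toList pvSep).toNat with hi
    have hcast : PySem.Chars.find s.toList pvSep = (i : Int) := by omega
    obtain ⟨hpre, -⟩ := PySem.Chars.find_spec h0
    rw [← hi] at hpre
    rw [pvSplitSpec, dif_neg hf]
    rw [hcast]
    rw [goB_spec s n (s.toList.length + 1) i [] hpre (by omega)]
    rw [List.tail_cons]
    rw [goA_spec n _ (noSep _) []]
    simp

-- ===== VERDICT (by name: the statement is the Claim_ definition above) =====
theorem extract_trees_from_dump_spec : Claim_equal_extract_trees_from_dump := by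
  intro dump_text n_trees _
  show _ = _
  exact main_equiv dump_text n_trees
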